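-- pv_equiv track=rewrite | github.com/SeraphWedd/CodeChef_Codes-Python-3.x- | beginner/CANDY123.py | sick
-- ===== SOURCE A (Python) =====
-- def sick(a, b):
--     an = ['Limak', 'Bob']
--     at = [b, a]
--     ac = [0, 0]
--     for x in range(1, 1000):
--         i = x%2
--         if ac[i]+(x) > at[i]:
--             return an[i]
--         else:
--             ac[i] += x
-- ===== SOURCE B (Python) =====
-- def _kth(a):
--     # smallest k >= 1 with k*k > a
--     if a < 1:
--         return 1
--     hi = 2
--     while hi * hi <= a:
--         hi *= 2
--     lo = 1
--     while hi - lo > 1: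
--         mid = (lo + hi) // 2
--         if mid * mid <= a:
--             lo = mid
--         else:
--             hi = mid
--     return hi
--
-- def _mth(b):
--     # smallest m >= 1 with m*(m+1) > b
--     if b < 2:
--         return 1
--     hi = 2
--     while hi * (hi + 1) <= b:
--         hi *= 2
--     lo = 1
--     while hi - lo > 1:
--         mid = (lo + hi) // 2
--         if mid * (mid + 1) <= b:
--             lo = mid
--         else:
--             hi = mid
--     return hi
--
-- def sick(a, b):
--     # Bob eats odd turns (total k*k after k turns), Limak even turns (total m*(m+1) after m turns);
--     # the loser is whoever first needs more than his limit: Bob at turn 2k-1, Limak at turn 2m.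
--     return 'Bob' if 2 * _kth(a) - 1 < 2 * _mth(b) else 'Limak'
-- ===== Notes on version B (the rewrite author's own statement) =====
-- stated objective: alternative
-- what changed: Replaces the 999-turn simulation with a closed form: Bob's fail turn is 2k-1 for the smallest k with k*k>a, Limak's is 2m for the smallest m with m(m+1)>b (both found by doubling + binary search), and the smaller turn decides.
-- outside the precondition, e.g. on sick(250000, 249500): A returns None, B returns 'Limak'
import Mathlib
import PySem

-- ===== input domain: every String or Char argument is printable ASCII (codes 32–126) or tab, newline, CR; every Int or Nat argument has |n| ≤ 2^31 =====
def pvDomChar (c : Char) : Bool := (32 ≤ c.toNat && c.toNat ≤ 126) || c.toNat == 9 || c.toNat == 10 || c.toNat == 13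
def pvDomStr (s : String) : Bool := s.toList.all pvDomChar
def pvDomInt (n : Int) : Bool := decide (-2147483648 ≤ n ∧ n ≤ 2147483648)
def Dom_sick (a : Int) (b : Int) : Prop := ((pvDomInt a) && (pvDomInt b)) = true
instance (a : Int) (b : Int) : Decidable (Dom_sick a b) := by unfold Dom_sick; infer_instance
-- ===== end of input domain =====

-- B replaces A's 999-turn simulation by a closed form (smallest k with k*k>a / m with m(m+1)>b,
-- found by doubling + binary search); proved equal wherever A returns a string.


-- ===== PORT A =====
-- for x in range(1, 1000): the 999 iterations are the structural fuel, x the loop variable.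
-- The two mutable cells ac[0]/ac[1] (and the fixed lists an/at) are carried as ac0/ac1; the
-- branch on i = x % 2 selects the same cell/limit/name as A's indexing.  Where Python falls
-- off the loop and returns None (no String), the port returns "" — excluded by Pre_sick.
def sickLoop (a b : Int) : Nat → Int → Int → Int → String
  | 0, _, _, _ => ""
  | n + 1, x, ac0, ac1 =>
    if x % 2 = 1 then
      if ac1 + x > a then "Bob" else sickLoop a b n (x + 1) ac0 (ac1 + x)
    else
      if ac0 + x > b then "Limak" else sickLoop a b n (x + 1) (ac0 + x) ac1

def sick (a : Int) (b : Int) : String := sickLoop a b 999 1 0 0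

-- ===== PORT B =====
-- while hi*hi <= a: hi *= 2    (fuel 64 only makes the recursion total; on the task's
-- |a| ≤ 2^31 domain the loop stops after at most 15 doublings, far below the fuel)
def kExpand (a : Int) : Nat → Int → Int
  | 0, hi => hi
  | n + 1, hi => if hi * hi ≤ a then kExpand a n (2 * hi) else hi

-- binary search; Python's mid = (lo + hi) // 2 appears as the floordiv term
def kSearch (a : Int) : Nat → Int → Int → Int
  | 0, _, hi => hi
  | n + 1, lo, hi =>
    if 1 < hi - lo then
      if PySem.Int.floordiv (lo + hi) 2 * PySem.Int.floordiv (lo + hi) 2 ≤ a then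
        kSearch a n (PySem.Int.floordiv (lo + hi) 2) hi
      else
        kSearch a n lo (PySem.Int.floordiv (lo + hi) 2)
    else hi

-- smallest k ≥ 1 with k*k > a
def kth (a : Int) : Int := if a < 1 then 1 else kSearch a 64 1 (kExpand a 64 2)

def mExpand (b : Int) : Nat → Int → Int
  | 0, hi => hi
  | n + 1, hi => if hi * (hi + 1) ≤ b then mExpand b n (2 * hi) else hi

def mSearch (b : Int) : Nat → Int → Int → Int
  | 0, _, hi => hi
  | n + 1, lo, hi =>
    if 1 < hi - lo then
      if PySem.Int.floordiv (lo + hi) 2 * (PySem.Int.floordiv (lo + hi) 2 + 1) ≤ b then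
        mSearch b n (PySem.Int.floordiv (lo + hi) 2) hi
      else
        mSearch b n lo (PySem.Int.floordiv (lo + hi) 2)
    else hi

-- smallest m ≥ 1 with m*(m+1) > b
def mth (b : Int) : Int := if b < 2 then 1 else mSearch b 64 1 (mExpand b 64 2)

def sick_alt (a : Int) (b : Int) : String :=
  if 2 * kth a - 1 < 2 * mth b then "Bob" else "Limak"

-- ===== PRECONDITION & SPEC =====
-- Pre_ excludes exactly the inputs (a ≥ 250000 and b ≥ 249500) where both fail turns exceed 999,
-- so A's loop finishes and Python returns None, which is not a String.
def Pre_sick (a : Int) (b : Int) : Prop := a < 250000 ∨ b < 249500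
instance (a : Int) (b : Int) : Decidable (Pre_sick a b) := by unfold Pre_sick; infer_instance
def pvWitness_sick : Int × Int := (5, 3)

def Spec_sick (a : Int) (b : Int) (out : String) : Prop := out = sick_alt a b
instance (a : Int) (b : Int) (out : String) : Decidable (Spec_sick a b out) := by unfold Spec_sick; infer_instance

-- ===== CLAIM (what is proved, stated in full; the proofs are below) =====
def Claim_equal_sick : Prop := ∀ (a : Int) (b : Int), Dom_sick a b → Pre_sick a b → Spec_sick a b (sick a b)

-- ===== LEMMAS AND PROOFS =====

lemma kExpand_spec (a : Int) : ∀ (n : Nat) (hi : Int), 1 ≤ hi → a < (hi * 2 ^ n) * (hi * 2 ^ n) →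
    hi ≤ kExpand a n hi ∧ a < kExpand a n hi * kExpand a n hi ∧
      (kExpand a n hi ≤ 2 * a ∨ kExpand a n hi = hi) := by
  intro n
  induction n with
  | zero =>
    intro hi h1 hbig
    simp only [pow_zero, mul_one] at hbig
    exact ⟨le_refl hi, by simpa [kExpand] using hbig, Or.inr rfl⟩
  | succ n ih =>
    intro hi h1 hbig
    rw [kExpand]
    by_cases hg : hi * hi ≤ a
    · rw [if_pos hg]
      have hle : hi ≤ hi * hi := le_mul_of_one_le_left (by omega) (by omega)
      have hbig' : a < (2 * hi * 2 ^ n) * (2 * hi * 2 ^ n) := by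
        have : (2 * hi * 2 ^ n) * (2 * hi * 2 ^ n) = (hi * 2 ^ (n + 1)) * (hi * 2 ^ (n + 1)) := by
          ring
        rw [this]; exact hbig
      obtain ⟨r1, r2, r3⟩ := ih (2 * hi) (by omega) hbig'
      refine ⟨by omega, r2, Or.inl ?_⟩
      rcases r3 with h | h
      · exact h
      · omega
    · rw [if_neg hg]
      exact ⟨le_refl hi, by omega, Or.inr rfl⟩

lemma kSearch_spec (a : Int) : ∀ (n : Nat) (lo hi : Int), hi - lo ≤ 2 ^ n → 1 ≤ lo →
    lo < hi → lo * lo ≤ a → a < hi * hi →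
    1 ≤ kSearch a n lo hi ∧ a < kSearch a n lo hi * kSearch a n lo hi ∧
      (kSearch a n lo hi - 1) * (kSearch a n lo hi - 1) ≤ a := by
  intro n
  induction n with
  | zero =>
    intro lo hi hn h1 hlt hlo hhi
    have hhl : hi - 1 = lo := by omega
    simp only [kSearch]
    exact ⟨by omega, hhi, by rw [hhl]; exact hlo⟩
  | succ n ih =>
    intro lo hi hn h1 hlt hlo hhi
    have hp : (2:Int) ^ (n + 1) = 2 * 2 ^ n := by ring
    have hp1 : (0:Int) < 2 ^ n := pow_pos (by norm_num) n
    rw [kSearch]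
    by_cases hg : 1 < hi - lo
    · have he : PySem.Int.floordiv (lo + hi) 2 = (lo + hi) / 2 :=
        PySem.Int.floordiv_eq_ediv_of_pos (by omega)
      rw [if_pos hg]
      by_cases hc : PySem.Int.floordiv (lo + hi) 2 * PySem.Int.floordiv (lo + hi) 2 ≤ a
      · rw [if_pos hc]
        exact ih (PySem.Int.floordiv (lo + hi) 2) hi (by omega) (by omega) (by omega) hc hhi
      · rw [if_neg hc]
        push Not at hc
        exact ih lo (PySem.Int.floordiv (lo + hi) 2) (by omega) h1 (by omega) hlo hc
    · rw [if_neg hg]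
      have hhl : hi - 1 = lo := by omega
      refine ⟨by omega, hhi, ?_⟩
      rw [hhl]; exact hlo

lemma kth_spec (a : Int) (hdom : a ≤ 2147483648) :
    1 ≤ kth a ∧ a < kth a * kth a ∧ ∀ t : Int, 1 ≤ t → a < t * t → kth a ≤ t := by
  unfold kth
  by_cases ha : a < 1
  · rw [if_pos ha]
    exact ⟨le_refl 1, by omega, fun t ht _ => ht⟩
  · rw [if_neg ha]
    have h64 : (2:Int) ^ 64 = 18446744073709551616 := by norm_num
    obtain ⟨hE1, hE2, hE3⟩ := kExpand_spec a 64 2 (by omega) (by nlinarith)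
    obtain ⟨h1, h2, h3⟩ := kSearch_spec a 64 1 (kExpand a 64 2)
      (by omega) (le_refl 1) (by omega) (by omega) hE2
    refine ⟨h1, h2, ?_⟩
    intro t ht hta
    by_contra hcon
    push Not at hcon
    have : t * t ≤ (kSearch a 64 1 (kExpand a 64 2) - 1) * (kSearch a 64 1 (kExpand a 64 2) - 1) :=
      mul_le_mul (by omega) (by omega) (by omega) (by omega)
    omega

lemma mExpand_spec (b : Int) : ∀ (n : Nat) (hi : Int), 1 ≤ hi → b < (hi * 2 ^ n) * (hi * 2 ^ n + 1) →
    hi ≤ mExpand b n hi ∧ b < mExpand b n hi * (mExpand b n hi + 1) ∧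
      (mExpand b n hi ≤ 2 * b ∨ mExpand b n hi = hi) := by
  intro n
  induction n with
  | zero =>
    intro hi h1 hbig
    simp only [pow_zero, mul_one] at hbig
    exact ⟨le_refl hi, by simpa [mExpand] using hbig, Or.inr rfl⟩
  | succ n ih =>
    intro hi h1 hbig
    rw [mExpand]
    by_cases hg : hi * (hi + 1) ≤ b
    · rw [if_pos hg]
      have hle : hi ≤ hi * (hi + 1) := le_mul_of_one_le_right (by omega) (by omega)
      have hbig' : b < (2 * hi * 2 ^ n) * (2 * hi * 2 ^ n + 1) := by
        have : (2 * hi * 2 ^ n) * (2 * hi * 2 ^ n + 1) =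
            (hi * 2 ^ (n + 1)) * (hi * 2 ^ (n + 1) + 1) := by ring
        rw [this]; exact hbig
      obtain ⟨r1, r2, r3⟩ := ih (2 * hi) (by omega) hbig'
      refine ⟨by omega, r2, Or.inl ?_⟩
      rcases r3 with h | h
      · exact h
      · omega
    · rw [if_neg hg]
      exact ⟨le_refl hi, by omega, Or.inr rfl⟩

lemma mSearch_spec (b : Int) : ∀ (n : Nat) (lo hi : Int), hi - lo ≤ 2 ^ n → 1 ≤ lo →
    lo < hi → lo * (lo + 1) ≤ b → b < hi * (hi + 1) →
    1 ≤ mSearch b n lo hi ∧ b < mSearch b n lo hi * (mSearch b n lo hi + 1) ∧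
      (mSearch b n lo hi - 1) * (mSearch b n lo hi - 1 + 1) ≤ b := by
  intro n
  induction n with
  | zero =>
    intro lo hi hn h1 hlt hlo hhi
    have hhl : hi - 1 = lo := by omega
    simp only [mSearch]
    exact ⟨by omega, hhi, by rw [hhl]; exact hlo⟩
  | succ n ih =>
    intro lo hi hn h1 hlt hlo hhi
    have hp : (2:Int) ^ (n + 1) = 2 * 2 ^ n := by ring
    have hp1 : (0:Int) < 2 ^ n := pow_pos (by norm_num) n
    rw [mSearch]
    by_cases hg : 1 < hi - lo
    · have he : PySem.Int.floordiv (lo + hi) 2 = (lo + hi) / 2 :=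
        PySem.Int.floordiv_eq_ediv_of_pos (by omega)
      rw [if_pos hg]
      by_cases hc : PySem.Int.floordiv (lo + hi) 2 * (PySem.Int.floordiv (lo + hi) 2 + 1) ≤ b
      · rw [if_pos hc]
        exact ih (PySem.Int.floordiv (lo + hi) 2) hi (by omega) (by omega) (by omega) hc hhi
      · rw [if_neg hc]
        push Not at hc
        exact ih lo (PySem.Int.floordiv (lo + hi) 2) (by omega) h1 (by omega) hlo hc
    · rw [if_neg hg]
      have hhl : hi - 1 = lo := by omega
      refine ⟨by omega, hhi, ?_⟩
      rw [hhl]; exact hlo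

lemma mth_spec (b : Int) (hdom : b ≤ 2147483648) :
    1 ≤ mth b ∧ b < mth b * (mth b + 1) ∧ ∀ t : Int, 1 ≤ t → b < t * (t + 1) → mth b ≤ t := by
  unfold mth
  by_cases hb : b < 2
  · rw [if_pos hb]
    exact ⟨le_refl 1, by omega, fun t ht _ => ht⟩
  · rw [if_neg hb]
    have h64 : (2:Int) ^ 64 = 18446744073709551616 := by norm_num
    obtain ⟨hE1, hE2, hE3⟩ := mExpand_spec b 64 2 (by omega) (by nlinarith)
    obtain ⟨h1, h2, h3⟩ := mSearch_spec b 64 1 (mExpand b 64 2)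
      (by omega) (le_refl 1) (by omega) (by omega) hE2
    refine ⟨h1, h2, ?_⟩
    intro t ht htb
    by_contra hcon
    push Not at hcon
    have : t * (t + 1) ≤ (mSearch b 64 1 (mExpand b 64 2) - 1) * (mSearch b 64 1 (mExpand b 64 2) - 1 + 1) :=
      mul_le_mul (by omega) (by omega) (by omega) (by omega)
    omega

-- the core invariant: after j full (odd,even) turn pairs the accumulators are j*(j+1) and j*j,
-- 2*d+1 turns remain, and the loop decides by whether Bob's fail index k or Limak's comes first
lemma sickLoop_inv (a b k m : Int)
    (hka : a < k * k) (hkmin : ∀ t : Int, 1 ≤ t → a < t * t → k ≤ t)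
    (hmb : b < m * (m + 1)) (hmmin : ∀ t : Int, 1 ≤ t → b < t * (t + 1) → m ≤ t)
    (hb1 : k ≤ m → k ≤ 500) (hb2 : m < k → m ≤ 499) :
    ∀ (d : Nat) (j : Int), 0 ≤ j → j + d = 499 → j < k → j < m →
      sickLoop a b (2 * d + 1) (2 * j + 1) (j * (j + 1)) (j * j) =
        if k ≤ m then "Bob" else "Limak" := by
  intro d
  induction d with
  | zero =>
    intro j hj0 hjd hjk hjm
    have hj : j = 499 := by omega
    rw [sickLoop, if_pos (by omega : (2 * j + 1) % 2 = 1)]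
    by_cases hA : a < (j + 1) * (j + 1)
    · have hk' : k ≤ j + 1 := hkmin (j + 1) (by omega) hA
      have hsq : (j + 1) * (j + 1) = j * j + (2 * j + 1) := by ring
      rw [if_pos (by omega : j * j + (2 * j + 1) > a), if_pos (by omega : k ≤ m)]
    · exfalso
      push Not at hA
      have hk' : j + 1 < k := by
        by_contra hc
        push Not at hc
        have : k * k ≤ (j + 1) * (j + 1) := mul_le_mul hc hc (by omega) (by omega)
        omega
      by_cases hkm : k ≤ m
      · have := hb1 hkm; omega
      · push Not at hkm
        have := hb2 hkm; omega
  | succ d ih =>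
    intro j hj0 hjd hjk hjm
    have hj : j ≤ 498 := by omega
    have hfe : 2 * (d + 1) + 1 = (2 * d + 1) + 1 + 1 := by omega
    rw [hfe, sickLoop, if_pos (by omega : (2 * j + 1) % 2 = 1)]
    by_cases hA : a < (j + 1) * (j + 1)
    · have hk' : k ≤ j + 1 := hkmin (j + 1) (by omega) hA
      have hsq : (j + 1) * (j + 1) = j * j + (2 * j + 1) := by ring
      rw [if_pos (by omega : j * j + (2 * j + 1) > a), if_pos (by omega : k ≤ m)]
    · push Not at hA
      have hk2 : j + 1 < k := by
        by_contra hc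
        push Not at hc
        have : k * k ≤ (j + 1) * (j + 1) := mul_le_mul hc hc (by omega) (by omega)
        omega
      have hsq : (j + 1) * (j + 1) = j * j + (2 * j + 1) := by ring
      rw [if_neg (by omega : ¬ j * j + (2 * j + 1) > a), sickLoop,
        if_neg (by omega : ¬ (2 * j + 1 + 1) % 2 = 1)]
      have hpr : (j + 1) * (j + 2) = j * (j + 1) + (2 * j + 1 + 1) := by ring
      by_cases hB : b < (j + 1) * (j + 2)
      · have hm' : m ≤ j + 1 := hmmin (j + 1) (by omega) (by
          have h22 : (j + 1) * (j + 1 + 1) = (j + 1) * (j + 2) := by ring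
          omega)
        rw [if_pos (by omega : j * (j + 1) + (2 * j + 1 + 1) > b),
          if_neg (by omega : ¬ k ≤ m)]
      · push Not at hB
        have hm2 : j + 1 < m := by
          by_contra hc
          push Not at hc
          have : m * (m + 1) ≤ (j + 1) * (j + 1 + 1) :=
            mul_le_mul hc (by omega) (by omega) (by omega)
          have h22 : (j + 1) * (j + 1 + 1) = (j + 1) * (j + 2) := by ring
          omega
        rw [if_neg (by omega : ¬ j * (j + 1) + (2 * j + 1 + 1) > b)]
        have e1 : 2 * j + 1 + 1 + 1 = 2 * (j + 1) + 1 := by ring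
        have e2 : j * (j + 1) + (2 * j + 1 + 1) = (j + 1) * (j + 1 + 1) := by ring
        have e3 : j * j + (2 * j + 1) = (j + 1) * (j + 1) := by ring
        rw [e1, e2, e3]
        exact ih (j + 1) (by omega) (by omega) hk2 hm2

-- ===== VERDICT (by name: the statement is the Claim_ definition above) =====
theorem sick_spec : Claim_equal_sick := by
  unfold Claim_equal_sick
  intro a b hdom hpre
  unfold Spec_sick
  have hdom' : a ≤ 2147483648 ∧ b ≤ 2147483648 := by
    unfold Dom_sick pvDomInt at hdom
    simp only [Bool.and_eq_true, decide_eq_true_eq] at hdom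
    omega
  obtain ⟨hk1, hka, hkmin⟩ := kth_spec a hdom'.1
  obtain ⟨hm1, hmb, hmmin⟩ := mth_spec b hdom'.2
  have hb12 : (kth a ≤ mth b → kth a ≤ 500) ∧ (mth b < kth a → mth b ≤ 499) := by
    rcases hpre with h | h
    · have h500 : kth a ≤ 500 := hkmin 500 (by omega) (by omega)
      exact ⟨fun _ => h500, fun hlt => by omega⟩
    · have h499 : mth b ≤ 499 := hmmin 499 (by omega) (by omega)
      exact ⟨fun hle => by omega, fun _ => h499⟩
  have hmain := sickLoop_inv a b (kth a) (mth b) hka hkmin hmb hmmin hb12.1 hb12.2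
    499 0 (by omega) (by omega) (by omega) (by omega)
  norm_num at hmain
  unfold sick sick_alt
  rw [hmain]
  by_cases hc : kth a ≤ mth b
  · rw [if_pos hc, if_pos (by omega)]
  · rw [if_neg hc, if_neg (by omega)]
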